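-- pv_equiv track=rewrite | github.com/allc/Advent-of-Code-2019 | day4part2.py | is_adj_pair
-- ===== SOURCE A (Python) =====
-- def is_adj_pair(n):
--     n = str(n)
--     lc = 1
--     last = n[0]
--     for c in n[1:]:
--         if c == last:
--             lc += 1
--         else:
--             if lc == 2:
--                 return True
--             lc = 1
--         last = c
--     if lc == 2:
--         return True
--     return False
-- ===== SOURCE B (Python) =====
-- def is_adj_pair(n):
--     def rl(s):
--         # recursive run-length decomposition: length of the leading run, then recurse
--         if not s:
--             return []
--         k = 1
--         while k < len(s) and s[k] == s[0]:
--             k += 1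
--         return [k] + rl(s[k:])
--     return 2 in rl(str(n))
-- ===== Notes on version B (the rewrite author's own statement) =====
-- stated objective: alternative
-- what changed: Replaces A's single stateful scan (running counter with explicit last-character tracking and early returns) by a recursive run-length decomposition: split the digit string into maximal runs, then test whether some run has length exactly two.
import Mathlib
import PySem

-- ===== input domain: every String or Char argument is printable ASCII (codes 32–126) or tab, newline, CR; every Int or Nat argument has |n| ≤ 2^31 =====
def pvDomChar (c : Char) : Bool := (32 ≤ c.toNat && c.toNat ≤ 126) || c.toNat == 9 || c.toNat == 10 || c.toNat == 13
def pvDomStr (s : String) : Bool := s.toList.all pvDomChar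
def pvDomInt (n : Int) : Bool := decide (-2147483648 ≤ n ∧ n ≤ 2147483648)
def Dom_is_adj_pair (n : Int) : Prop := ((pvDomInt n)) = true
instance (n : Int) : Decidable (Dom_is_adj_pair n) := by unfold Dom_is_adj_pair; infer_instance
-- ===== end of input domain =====

-- B replaces A's stateful counter scan by a recursive run-length decomposition; objective: alternative (same cost).

-- ===== PORT A =====
-- the for-loop of A over n[1:] with state (last, lc) and early returns
def isAdjLoop (last : Char) (lc : Int) : List Char → Bool
  | [] => lc == 2
  | c :: rest =>
      if c == last then isAdjLoop last (lc + 1) rest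
      else if lc == 2 then true
      else isAdjLoop c 1 rest

def is_adj_pair (n : Int) : Bool :=
  match PySem.Int.toChars n with
  | [] => false          -- unreachable: str(n) is never empty
  | c :: rest => isAdjLoop c 1 rest

-- ===== PORT B =====
-- rl: run lengths of the string, by recursion on the leading run (the while-loop
-- counting the leading run is ported as takeWhile/dropWhile on the tail)
def rlRuns : List Char → List Int
  | [] => []
  | c :: rest =>
      (1 + ((rest.takeWhile (· == c)).length : Int)) :: rlRuns (rest.dropWhile (· == c))
termination_by cs => cs.length
decreasing_by
  simp only [List.length_cons]
  exact Nat.lt_succ_of_le (List.length_dropWhile_le _ _)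

def is_adj_pair_alt (n : Int) : Bool :=
  (rlRuns (PySem.Int.toChars n)).contains 2

-- ===== PRECONDITION & SPEC =====
def Spec_is_adj_pair (n : Int) (out : Bool) : Prop := out = is_adj_pair_alt n
instance (n : Int) (out : Bool) : Decidable (Spec_is_adj_pair n out) := by unfold Spec_is_adj_pair; infer_instance

-- ===== CLAIM (what is proved, stated in full; the proofs are below) =====
def Claim_equal_is_adj_pair : Prop := ∀ (n : Int), Dom_is_adj_pair n → Spec_is_adj_pair n (is_adj_pair n)

-- ===== LEMMAS AND PROOFS =====
theorem rlRuns_nil : rlRuns [] = [] := by rw [rlRuns]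

theorem rlRuns_cons (c : Char) (rest : List Char) :
    rlRuns (c :: rest) =
      (1 + ((rest.takeWhile (· == c)).length : Int)) :: rlRuns (rest.dropWhile (· == c)) := by
  rw [rlRuns]

-- "the head run-length is 2" rewritten to match A's counter form
theorem head_run_two (rest : List Char) (c : Char) :
    ((2 : Int) == 1 + ((rest.takeWhile (· == c)).length : Int)) =
      decide ((1 : Int) + ((rest.takeWhile (· == c)).length : Int) = 2) := by
  rw [Bool.eq_iff_iff]
  simp only [beq_iff_eq, decide_eq_true_eq]
  omega

-- A's loop, started with counter lc on current run-character `last`, says "2 ∈ run lengths",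
-- where the current run is completed by the leading `last`-block of cs.
theorem isAdjLoop_eq (cs : List Char) : ∀ (last : Char) (lc : Int),
    isAdjLoop last lc cs =
      (decide (lc + ((cs.takeWhile (· == last)).length : Int) = 2)
        || (rlRuns (cs.dropWhile (· == last))).contains 2) := by
  induction cs with
  | nil =>
      intro last lc
      simp only [isAdjLoop, List.takeWhile_nil, List.dropWhile_nil, rlRuns_nil,
        List.contains, List.elem_nil, Bool.or_false, List.length_nil, Nat.cast_zero,
        Int.add_zero]
      rw [Bool.eq_iff_iff]
      simp
  | cons c rest ih =>
      intro last lc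
      by_cases h : c = last
      · subst h
        simp only [isAdjLoop, beq_self_eq_true, if_true, List.takeWhile_cons_of_pos,
          List.dropWhile_cons_of_pos, List.length_cons, ih]
        congr 1
        rw [decide_eq_decide]
        push_cast
        omega
      · have hb : (c == last) = false := by simp [h]
        simp only [isAdjLoop, hb, Bool.false_eq_true, if_false, List.takeWhile_cons,
          List.dropWhile_cons, List.length_nil, Nat.cast_zero, Int.add_zero,
          rlRuns_cons, List.contains, List.elem_cons, ih c 1]
        by_cases h2 : lc = 2
        · simp [h2]
        · have hB : (lc == 2) = false := by simp [h2]
          have hd : decide (lc = 2) = false := by simp [h2]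
          simp only [hB, Bool.false_eq_true, if_false, hd, Bool.false_or, head_run_two]
          cases hx : decide ((1 : Int) + ((rest.takeWhile (· == c)).length : Int) = 2) <;> simp

-- ===== VERDICT (by name: the statement is the Claim_ definition above) =====
theorem is_adj_pair_spec : Claim_equal_is_adj_pair := by
  intro n _
  unfold Spec_is_adj_pair is_adj_pair is_adj_pair_alt
  cases hs : PySem.Int.toChars n with
  | nil => simp [rlRuns_nil]
  | cons c rest =>
      show isAdjLoop c 1 rest = (rlRuns (c :: rest)).contains 2
      rw [isAdjLoop_eq, rlRuns_cons]
      simp only [List.contains, List.elem_cons, head_run_two]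
      cases hx : decide ((1 : Int) + ((rest.takeWhile (· == c)).length : Int) = 2) <;> simp
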